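-- pv_equiv track=rewrite | github.com/5ury44/cumulus | worker/cumulus_manager.py | _extract_partition_id
-- ===== SOURCE A (Python) =====
-- from typing import List, Dict, Optional, Any
--
-- def _extract_partition_id(output: str) -> Optional[str]:
--     """Extract partition ID from Chronos output."""
--     lines = output.split('\n')
--
--     for line in lines:
--         if 'partition_' in line:
--             # Look for pattern like "partition_0001"
--             words = line.split()
--             for word in words:
--                 if word.startswith('partition_'):
--                     return word
--
--     return None
-- ===== SOURCE B (Python) =====
-- def _extract_partition_id(output):
--     """Extract partition ID from Chronos output."""
--     return next((w for w in output.split() if w.startswith('partition_')), None)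
-- ===== Notes on version B (the rewrite author's own statement) =====
-- stated objective: simpler
-- what changed: Replaces the nested split('\n')-then-split() loops with the 'partition_' in line guard by a single pass over output.split(), returning the first whitespace-delimited token starting with 'partition_'.
import Mathlib
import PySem

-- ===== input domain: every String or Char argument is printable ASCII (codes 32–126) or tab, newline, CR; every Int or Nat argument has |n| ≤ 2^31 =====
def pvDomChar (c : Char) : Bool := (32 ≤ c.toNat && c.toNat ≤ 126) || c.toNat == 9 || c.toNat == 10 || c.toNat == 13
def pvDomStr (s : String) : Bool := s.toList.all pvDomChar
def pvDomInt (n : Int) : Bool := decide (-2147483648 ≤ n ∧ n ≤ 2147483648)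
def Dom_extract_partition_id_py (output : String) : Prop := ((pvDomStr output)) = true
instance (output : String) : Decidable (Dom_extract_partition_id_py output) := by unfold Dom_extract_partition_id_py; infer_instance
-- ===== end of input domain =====

-- B replaces A's line loop + substring guard + per-line word loop by one pass over
-- output.split(), returning the first token that starts with 'partition_' (simpler; same value).

-- ===== PORT A =====
-- inner loop: 'for word in words: if word.startswith("partition_"): return word'
def pvAwords : List String → Option String
  | [] => none
  | w :: ws => if PySem.Str.startswith w "partition_" then some w else pvAwords ws

-- outer loop: 'for line in lines: if "partition_" in line: …'
def pvAlines : List String → Option String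
  | [] => none
  | line :: rest =>
    if PySem.Str.isIn "partition_" line then
      match pvAwords (PySem.Str.split₀ line) with
      | some w => some w
      | none => pvAlines rest
    else pvAlines rest

def extract_partition_id_py (output : String) : Option String :=
  -- output.split('\n'): sep is the non-empty literal "\n", so Chars.splitOn is exact here
  pvAlines ((PySem.Chars.splitOn output.toList "\n".toList).map String.ofList)

-- ===== PORT B =====
def extract_partition_id_py_alt (output : String) : Option String :=
  (PySem.Str.split₀ output).find? (fun w => PySem.Str.startswith w "partition_")

-- ===== PRECONDITION & SPEC =====
def Spec_extract_partition_id_py (output : String) (out : Option String) : Prop := out = extract_partition_id_py_alt output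
instance (output : String) (out : Option String) : Decidable (Spec_extract_partition_id_py output out) := by unfold Spec_extract_partition_id_py; infer_instance

-- ===== CLAIM (what is proved, stated in full; the proofs are below) =====
def Claim_equal_extract_partition_id_py : Prop := ∀ (output : String), Dom_extract_partition_id_py output → Spec_extract_partition_id_py output (extract_partition_id_py output)

-- ===== LEMMAS AND PROOFS =====

-- accumulator-free model of PySem.Chars.split₀ (s.split())
def pvW : List Char → List Char → List (List Char)
  | [], cur => if cur.isEmpty then [] else [cur.reverse]
  | c :: rest, cur =>
    if PySem.Chars.isspace c then
      (if cur.isEmpty then pvW rest [] else cur.reverse :: pvW rest [])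
    else pvW rest (c :: cur)

-- accumulator-free model of PySem.Chars.splitOn · ['\n'] (s.split('\n'))
def pvS : List Char → List Char → List (List Char)
  | [], cur => [cur.reverse]
  | c :: rest, cur => if c = '\n' then cur.reverse :: pvS rest [] else pvS rest (c :: cur)

theorem pvW_go (s : List Char) : ∀ cur acc,
    PySem.Chars.split₀.go s cur acc = acc.reverse ++ pvW s cur := by
  induction s with
  | nil => intro cur acc; simp [PySem.Chars.split₀.go, pvW]; split <;> simp
  | cons c rest ih =>
    intro cur acc
    simp only [PySem.Chars.split₀.go, pvW]
    split
    · split <;> simp [ih]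
    · exact ih _ _

theorem pvW_split₀ (s : List Char) : PySem.Chars.split₀ s = pvW s [] := by
  simpa using pvW_go s [] []

theorem pvS_go : ∀ (fuel : Nat) (l cur : List Char) (acc : List (List Char)), l.length < fuel →
    PySem.Chars.splitOn.go ['\n'] fuel l cur acc = acc.reverse ++ pvS l cur := by
  intro fuel
  induction fuel with
  | zero => intro l cur acc h; omega
  | succ n ih =>
    intro l cur acc h
    cases l with
    | nil => simp [PySem.Chars.splitOn.go, pvS]
    | cons c rest =>
      simp only [PySem.Chars.splitOn.go, pvS, List.isPrefixOf, List.length_cons] at *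
      by_cases hc : c = '\n'
      · simp [hc, ih rest [] (cur.reverse :: acc) (by omega)]
      · have : ('\n' == c && true) = false := by simp; exact fun h => hc h.symm
        rw [if_neg (by simp [this]), if_neg hc]
        exact ih rest (c :: cur) acc (by omega)

theorem pvS_splitOn (s : List Char) : PySem.Chars.splitOn s ['\n'] = pvS s [] := by
  have := pvS_go (s.length + 1) s [] [] (by omega)
  simpa [PySem.Chars.splitOn] using this

-- a whitespace character splits a split() in two
theorem pvW_append_space {c : Char} (hc : PySem.Chars.isspace c = true) :
    ∀ (a b cur : List Char), pvW (a ++ c :: b) cur = pvW a cur ++ pvW b [] := by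
  intro a
  induction a with
  | nil =>
    intro b cur
    simp only [List.nil_append, pvW, hc, if_true]
    by_cases hcur : cur = [] <;> simp [hcur]
  | cons d a' ih =>
    intro b cur
    simp only [List.cons_append, pvW]
    split
    · split <;> simp [ih]
    · exact ih _ _

theorem pvW_flatten : ∀ (cs cur : List Char),
    pvW (cur.reverse ++ cs) [] = (pvS cs cur).flatMap (fun l => pvW l []) := by
  intro cs
  induction cs with
  | nil => intro cur; simp [pvS]
  | cons c rest ih =>
    intro cur
    by_cases hc : c = '\n'
    · subst hc
      rw [show pvS ('\n' :: rest) cur = cur.reverse :: pvS rest [] from by simp [pvS]]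
      rw [pvW_append_space (by decide)]
      have h2 := ih []
      simp only [List.reverse_nil, List.nil_append] at h2
      simp [List.flatMap_cons, h2]
    · simp only [pvS, if_neg hc]
      rw [← ih (c :: cur)]
      simp
-- every word of split() is an infix of the string
theorem pvW_mem_infix : ∀ (s cur w : List Char), w ∈ pvW s cur → w <:+: (cur.reverse ++ s) := by
  intro s
  induction s with
  | nil =>
    intro cur w hw
    simp only [pvW] at hw
    split at hw <;> simp_all
  | cons c rest ih =>
    intro cur w hw
    simp only [pvW] at hw
    split at hw
    · have hsub : w <:+: rest → w <:+: cur.reverse ++ c :: rest := fun h =>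
        h.trans ⟨cur.reverse ++ [c], [], by simp⟩
      split at hw
      · exact hsub (by simpa using ih [] w hw)
      · rcases List.mem_cons.mp hw with rfl | hw
        · exact ⟨[], c :: rest, by simp⟩
        · exact hsub (by simpa using ih [] w hw)
    · have := ih (c :: cur) w hw
      simpa using this

theorem pv_guard (pat l : List Char) (h : PySem.Chars.isIn pat l = false) :
    (PySem.Chars.split₀ l).find? (fun w => PySem.Chars.startswith w pat) = none := by
  rw [List.find?_eq_none]
  intro w hw
  by_contra hb
  have hst : pat <+: w := (PySem.Chars.startswith_iff _ _).mp (by simpa using hb)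
  have hin : w <:+: l := by
    have := pvW_mem_infix l [] w (by rwa [pvW_split₀] at hw)
    simpa using this
  have : PySem.Chars.isIn pat l = true := (PySem.Chars.isIn_iff_infix _ _).mpr (hst.isInfix.trans hin)
  simp [this] at h

-- chars-level image of A's line loop
def pvALc : List (List Char) → Option (List Char)
  | [] => none
  | l :: rest =>
    if PySem.Chars.isIn ['p','a','r','t','i','t','i','o','n','_'] l then
      match (PySem.Chars.split₀ l).find? (fun w => PySem.Chars.startswith w ['p','a','r','t','i','t','i','o','n','_']) with
      | some w => some w
      | none => pvALc rest
    else pvALc rest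

theorem pvAwords_map (ws : List (List Char)) :
    pvAwords (ws.map String.ofList) =
      (ws.find? (fun w => PySem.Chars.startswith w ['p','a','r','t','i','t','i','o','n','_'])).map String.ofList := by
  induction ws with
  | nil => rfl
  | cons w ws ih =>
    simp only [List.map_cons, pvAwords, List.find?, PySem.Str.startswith, String.toList_ofList]
    by_cases h : PySem.Chars.startswith w ['p','a','r','t','i','t','i','o','n','_'] = true
    · simp [h]
    · simp only [Bool.not_eq_true] at h
      simp [h, ih]

theorem pvAlines_map (ls : List (List Char)) :
    pvAlines (ls.map String.ofList) = (pvALc ls).map String.ofList := by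
  induction ls with
  | nil => rfl
  | cons l rest ih =>
    simp only [List.map_cons, pvAlines, pvALc, PySem.Str.isIn, PySem.Str.split₀,
      String.toList_ofList]
    by_cases h : PySem.Chars.isIn ['p','a','r','t','i','t','i','o','n','_'] l = true
    · simp only [h, if_pos]
      rw [pvAwords_map]
      cases hf : (PySem.Chars.split₀ l).find? (fun w => PySem.Chars.startswith w ['p','a','r','t','i','t','i','o','n','_']) <;>
        simp_all
    · simp only [Bool.not_eq_true] at h
      simp [h, ih]

theorem pvALc_flat (ls : List (List Char)) :
    pvALc ls = (ls.flatMap (fun l => PySem.Chars.split₀ l)).find?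
      (fun w => PySem.Chars.startswith w ['p','a','r','t','i','t','i','o','n','_']) := by
  induction ls with
  | nil => rfl
  | cons l rest ih =>
    simp only [pvALc, List.flatMap_cons, List.find?_append]
    by_cases h : PySem.Chars.isIn ['p','a','r','t','i','t','i','o','n','_'] l = true
    · simp only [h, if_pos]
      cases hf : (PySem.Chars.split₀ l).find? (fun w => PySem.Chars.startswith w ['p','a','r','t','i','t','i','o','n','_']) <;>
        simp_all
    · simp only [Bool.not_eq_true] at h
      rw [pv_guard _ _ h]
      simp [h, ih]

-- ===== VERDICT (by name: the statement is the Claim_ definition above) =====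
theorem extract_partition_id_py_spec : Claim_equal_extract_partition_id_py := by
  intro output _
  unfold Spec_extract_partition_id_py extract_partition_id_py extract_partition_id_py_alt
  rw [show ("\n".toList) = ['\n'] from rfl, pvS_splitOn, pvAlines_map, pvALc_flat]
  have hflat : (pvS output.toList []).flatMap (fun l => PySem.Chars.split₀ l) =
      PySem.Chars.split₀ output.toList := by
    simp only [pvW_split₀]
    have := pvW_flatten output.toList []
    simpa using this.symm
  rw [hflat]
  simp only [PySem.Str.split₀]
  rw [List.find?_map]
  simp [Function.comp_def, PySem.Str.startswith]
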